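-- pv_equiv track=rewrite | github.com/tan90cot0/Comp-Coding | cp.py | make_unidirectional
-- ===== SOURCE A (Python) =====
-- def make_unidirectional(graph):
--     unidirectional_graph = {}
--     visited = set()
--
--     def dfs(node):
--         visited.add(node)
--         for neighbor in graph[node]:
--             if neighbor not in visited:
--                 unidirectional_graph[node].append(neighbor)
--                 dfs(neighbor)
--
--     # Initialize the unidirectional graph with an empty adjacency list for each node
--     for node in graph:
--         unidirectional_graph[node] = []
--
--     # Start DFS from the root node (assumed to be node 1)
--     dfs(1)
--
--     return unidirectional_graph
-- ===== SOURCE B (Python) =====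
-- def make_unidirectional(graph):
--     unidirectional_graph = {node: [] for node in graph}
--     visited = {1}
--     stack = [(1, iter(graph[1]))]
--     while stack:
--         node, it = stack[-1]
--         for neighbor in it:
--             if neighbor not in visited:
--                 unidirectional_graph[node].append(neighbor)
--                 visited.add(neighbor)
--                 stack.append((neighbor, iter(graph[neighbor])))
--                 break
--         else:
--             stack.pop()
--     return unidirectional_graph
-- ===== Notes on version B (the rewrite author's own statement) =====
-- stated objective: alternative
-- what changed: A's recursive DFS (nested dfs() mutating enclosing dict/set) is replaced by an iterative DFS over an explicit stack of (node, iterator-over-neighbours) frames, which reproduces the same discovery order and result; Pre_ excludes exactly the inputs where the Python raises KeyError (node 1 missing, or a node reachable from 1 that is not a key).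
import Mathlib
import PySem

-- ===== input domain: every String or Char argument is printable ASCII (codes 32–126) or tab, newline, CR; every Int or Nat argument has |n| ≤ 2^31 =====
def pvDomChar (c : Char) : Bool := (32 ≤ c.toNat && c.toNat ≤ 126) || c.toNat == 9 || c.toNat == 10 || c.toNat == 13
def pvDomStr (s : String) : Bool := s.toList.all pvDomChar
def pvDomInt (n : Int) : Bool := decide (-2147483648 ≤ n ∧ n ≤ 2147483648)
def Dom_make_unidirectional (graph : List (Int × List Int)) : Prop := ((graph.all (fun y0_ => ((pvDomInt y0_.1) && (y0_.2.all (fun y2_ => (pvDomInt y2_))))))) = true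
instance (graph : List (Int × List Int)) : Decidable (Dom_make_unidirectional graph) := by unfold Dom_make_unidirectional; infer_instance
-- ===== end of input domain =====

-- B replaces A's recursive DFS by an iterative DFS over an explicit stack of (node, remaining-neighbours)
-- frames (same visit order, same result); objective: alternative decomposition, no speed claim.


-- State of both programs: (unidirectional_graph, visited)
abbrev pvSt := PySem.Dict Int (List Int) × PySem.Set Int

-- fuel guard (one tick per neighbour occurrence consumed; the total number of neighbour
-- occurrences ever consumed is bounded by the sum of all adjacency-list lengths)
def pvFuel (graph : List (Int × List Int)) : Nat :=
  graph.foldl (fun a p => a + p.2.length) 0 + 1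

-- ===== PORT A =====
-- dfs(node) inlined into its own for-loop: pvDfsA graph f n vs st runs A's
-- 'for neighbor in vs' body for current node n; on an unvisited neighbour it appends,
-- marks visited (dfs entry) and recurses into the neighbour's adjacency list.
-- Returns the state together with the fuel left (fuel is only a totality guard).
def pvDfsA (graph : List (Int × List Int)) :
    (f : Nat) → Int → List Int → pvSt → pvSt × {g : Nat // g ≤ f}
  | f, _, [], st => (st, ⟨f, Nat.le_refl f⟩)
  | 0, _, _ :: _, st => (st, ⟨0, Nat.le_refl 0⟩)
  | f + 1, n, v :: vs, st =>
      if PySem.Set.contains st.2 v then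
        let r := pvDfsA graph f n vs st
        (r.1, ⟨r.2.1, Nat.le_succ_of_le r.2.2⟩)
      else
        -- unidirectional_graph[node].append(neighbor); dfs(neighbor): visited.add(neighbor)
        let st1 : pvSt := (st.1.modify n [] (· ++ [v]), PySem.Set.add st.2 v)
        -- for neighbor2 in graph[neighbor]: …
        let r1 := pvDfsA graph f v ((List.lookup v graph).getD []) st1
        -- continue the loop over the remaining neighbours vs of n
        let r2 := pvDfsA graph r1.2.1 n vs r1.1
        (r2.1, ⟨r2.2.1, Nat.le_succ_of_le (Nat.le_trans r2.2.2 r1.2.2)⟩)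
  termination_by f => f
  decreasing_by
  · exact Nat.lt_succ_of_le (Nat.le_refl f)
  · exact Nat.lt_succ_of_le (Nat.le_refl f)
  · exact Nat.lt_succ_of_le r1.2.2

def make_unidirectional (graph : List (Int × List Int)) : List (Int × List Int) :=
  -- for node in graph: unidirectional_graph[node] = []
  let uni0 : PySem.Dict Int (List Int) :=
    graph.foldl (fun d p => d.insert p.1 []) PySem.Dict.empty
  -- dfs(1): visited.add(1); for neighbor in graph[1]: …
  let r := pvDfsA graph (pvFuel graph) 1 ((List.lookup 1 graph).getD [])
             (uni0, PySem.Set.add PySem.Set.empty 1)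
  r.1.1.items

-- ===== PORT B =====
-- while stack: peek (node, iterator); advance the iterator (frame keeps the remaining
-- neighbours); pop on exhaustion; on an unvisited neighbour append/mark/push its frame.
def pvLoopB (graph : List (Int × List Int)) :
    Nat → List (Int × List Int) → pvSt → pvSt
  | _, [], st => st
  | f, (_, []) :: S, st => pvLoopB graph f S st           -- for…else: stack.pop()
  | 0, (_, _ :: _) :: _, st => st                          -- fuel guard (never reached)
  | f + 1, (n, v :: vs) :: S, st =>
      if PySem.Set.contains st.2 v then
        pvLoopB graph f ((n, vs) :: S) st
      else
        pvLoopB graph f ((v, (List.lookup v graph).getD []) :: (n, vs) :: S)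
          (st.1.modify n [] (· ++ [v]), PySem.Set.add st.2 v)
  termination_by f S => (f, S.length)
  decreasing_by
  · exact Prod.Lex.right f (Nat.lt_succ_of_le (Nat.le_refl S.length))
  · exact Prod.Lex.left _ _ (Nat.lt_succ_of_le (Nat.le_refl f))
  · exact Prod.Lex.left _ _ (Nat.lt_succ_of_le (Nat.le_refl f))

def make_unidirectional_alt (graph : List (Int × List Int)) : List (Int × List Int) :=
  -- unidirectional_graph = {node: [] for node in graph}
  let uni0 : PySem.Dict Int (List Int) :=
    graph.foldl (fun d p => d.insert p.1 []) PySem.Dict.empty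
  -- visited = {1}; stack = [(1, iter(graph[1]))]
  (pvLoopB graph (pvFuel graph) [(1, (List.lookup 1 graph).getD [])]
      (uni0, PySem.Set.add PySem.Set.empty 1)).1.items

-- ===== PRECONDITION & SPEC =====
-- Reachability saturation (monotone frontier expansion, NOT either port's DFS): after
-- graph.length rounds it contains every node reachable from the start set along edges
-- u → v with v listed among the (first-match) neighbours of u.
def pvReach (graph : List (Int × List Int)) : Nat → List Int → List Int
  | 0, R => R
  | k + 1, R =>
      pvReach graph k
        (PySem.Set.update R (R.flatMap (fun u => (List.lookup u graph).getD [])))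

-- Pre_ excludes exactly the inputs on which the Python raises KeyError: node 1 is not a key
-- of the graph, or some node reachable from 1 is not a key of the graph.
def Pre_make_unidirectional (graph : List (Int × List Int)) : Prop :=
  1 ∈ graph.map Prod.fst ∧
  ∀ w ∈ pvReach graph graph.length [1], w ∈ graph.map Prod.fst
instance (graph : List (Int × List Int)) : Decidable (Pre_make_unidirectional graph) := by
  unfold Pre_make_unidirectional; infer_instance

def pvWitness_make_unidirectional : (List (Int × List Int)) :=
  [(1, [2, 3]), (2, [3, 1]), (3, [])]

def Spec_make_unidirectional (graph : List (Int × List Int)) (out : List (Int × List Int)) : Prop := out = make_unidirectional_alt graph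
instance (graph : List (Int × List Int)) (out : List (Int × List Int)) : Decidable (Spec_make_unidirectional graph out) := by unfold Spec_make_unidirectional; infer_instance

-- ===== CLAIM (what is proved, stated in full; the proofs are below) =====
def Claim_equal_make_unidirectional : Prop := ∀ (graph : List (Int × List Int)), Dom_make_unidirectional graph → Pre_make_unidirectional graph → Spec_make_unidirectional graph (make_unidirectional graph)

-- ===== LEMMAS AND PROOFS =====

-- with fuel 0 the stack loop only pops exhausted frames and stops: the state is unchanged
lemma pvLoopB_zero (graph : List (Int × List Int)) :
    ∀ (S : List (Int × List Int)) (st : pvSt), pvLoopB graph 0 S st = st := by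
  intro S st
  induction S with
  | nil => simp [pvLoopB]
  | cons p S ih =>
      obtain ⟨n, vs⟩ := p
      cases vs with
      | nil => rw [pvLoopB]; exact ih
      | cons v vs => rw [pvLoopB]

-- defunctionalization: running the stack loop on a top frame (n, vs) is running A's
-- recursive loop body on (n, vs) and then the stack loop on the rest of the stack with
-- the fuel A's side has left.  Both sides tick fuel exactly once per neighbour consumed.
lemma pvMaster (graph : List (Int × List Int)) :
    ∀ (f : Nat) (n : Int) (vs : List Int) (S : List (Int × List Int)) (st : pvSt),
      pvLoopB graph f ((n, vs) :: S) st =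
        pvLoopB graph (pvDfsA graph f n vs st).2.1 S (pvDfsA graph f n vs st).1 := by
  intro f
  induction f using Nat.strong_induction_on with
  | _ f ih =>
    intro n vs S st
    match f, vs with
    | f, [] => rw [pvLoopB, pvDfsA]
    | 0, v :: vs =>
        rw [pvLoopB, pvDfsA]
        exact (pvLoopB_zero graph S st).symm
    | f + 1, v :: vs =>
        rw [pvLoopB, pvDfsA]
        by_cases h : PySem.Set.contains st.2 v
        · simp only [h, if_true]
          exact ih f (Nat.lt_succ_self f) n vs S st
        · simp only [h, Bool.false_eq_true, if_false]
          rw [ih f (Nat.lt_succ_self f) v ((List.lookup v graph).getD [])]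
          exact ih _ (Nat.lt_succ_of_le (pvDfsA graph f v _ _).2.2) n vs S _

-- ===== VERDICT (by name: the statement is the Claim_ definition above) =====
theorem make_unidirectional_spec : Claim_equal_make_unidirectional := by
  intro graph _ _
  show make_unidirectional graph = make_unidirectional_alt graph
  simp only [make_unidirectional, make_unidirectional_alt, pvMaster graph, pvLoopB]
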